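-- pv_equiv track=rewrite | github.com/PedroRAlberti/estudo | prog_impatech/prog_1/lista-3/3-3.py | let
-- ===== SOURCE A (Python) =====
-- def let(a):
--     vogais = ["a","e","i","o","u"]
--     list = []
--     for i in a:
--         for j in vogais:
--             if i == j:
--                 list.append(i)
--                 vogais.remove(j)
--     return list
-- ===== SOURCE B (Python) =====
-- def let(a):
--     vowels = ["a", "e", "i", "o", "u"]
--     hits = [(a.find(v), v) for v in vowels]
--     hits = [h for h in hits if h[0] >= 0]
--     hits.sort(key=lambda h: h[0])
--     return [h[1] for h in hits]
-- ===== Notes on version B (the rewrite author's own statement) =====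
-- stated objective: faster
-- what changed: Replaces A's per-character pass with a shrinking candidate list by a staged algorithm: compute each vowel's first index with str.find, drop absent vowels, sort the at-most-five (index, vowel) pairs by index, and return the vowels in that order.
import Mathlib
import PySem

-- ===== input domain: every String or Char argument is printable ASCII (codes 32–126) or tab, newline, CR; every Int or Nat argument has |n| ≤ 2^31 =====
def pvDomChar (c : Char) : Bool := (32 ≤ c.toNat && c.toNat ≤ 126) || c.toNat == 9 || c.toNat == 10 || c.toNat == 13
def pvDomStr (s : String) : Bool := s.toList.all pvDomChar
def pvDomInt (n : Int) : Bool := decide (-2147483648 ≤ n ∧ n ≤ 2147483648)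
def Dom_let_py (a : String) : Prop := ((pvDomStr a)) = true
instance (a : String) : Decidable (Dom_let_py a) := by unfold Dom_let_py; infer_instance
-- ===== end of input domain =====

-- B replaces A's per-character pass over a shrinking candidate list by a staged algorithm:
-- first index of each vowel via str.find, filter out the absent ones, sort by that index (measured faster).

-- ===== PORT A =====
-- Python's inner 'for j in vogais: … vogais.remove(j)': removing the matched j makes the
-- iteration skip the next element; since vogais never holds duplicates and i matches at most
-- one element, this is exactly "stop copying, drop the matched element, keep the rest":
def letLoopJ (s : String) : List String → Bool × List String
  | [] => (false, [])
  | j :: rest =>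
      if s = j then (true, rest)
      else
        let p := letLoopJ s rest
        (p.1, j :: p.2)

def letStepA (st : List String × List String) (c : Char) : List String × List String :=
  let s := String.ofList [c]
  let r := letLoopJ s st.1
  (r.2, if r.1 then st.2 ++ [s] else st.2)

def let_py (a : String) : List String :=
  (a.toList.foldl letStepA (["a", "e", "i", "o", "u"], [])).2

-- ===== PORT B =====
def let_py_alt (a : String) : List String :=
  let vowels : List String := ["a", "e", "i", "o", "u"]
  let hits := vowels.map (fun v => (PySem.Str.find a v, v))
  let hits2 := hits.filter (fun h => decide (0 ≤ h.1))
  (PySem.List.sorted hits2 (fun h => h.1) false).map (fun h => h.2)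

-- ===== PRECONDITION & SPEC =====
def Spec_let_py (a : String) (out : List String) : Prop := out = let_py_alt a
instance (a : String) (out : List String) : Decidable (Spec_let_py a out) := by unfold Spec_let_py; infer_instance

-- ===== CLAIM (what is proved, stated in full; the proofs are below) =====
def Claim_equal_let_py : Prop := ∀ (a : String), Dom_let_py a → Spec_let_py a (let_py a)

-- ===== LEMMAS AND PROOFS =====

-- canonical "distinct vowels in order of first appearance", the bridge between the two ports
def canonStep (st : List String) (c : Char) : List String :=
  let s := String.ofList [c]
  if s ∈ (["a", "e", "i", "o", "u"] : List String) ∧ s ∉ st then st ++ [s] else st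

theorem letLoopJ_not_mem (s : String) (l : List String) (h : s ∉ l) :
    letLoopJ s l = (false, l) := by
  induction l with
  | nil => rfl
  | cons j rest ih =>
      simp only [List.mem_cons, not_or] at h
      simp [letLoopJ, h.1, ih h.2]

theorem letLoopJ_mem (s : String) (l : List String) (hnd : l.Nodup) (h : s ∈ l) :
    letLoopJ s l = (true, l.erase s) := by
  induction l with
  | nil => cases h
  | cons j rest ih =>
      by_cases hj : s = j
      · subst hj
        have : s ∉ rest := (List.nodup_cons.mp hnd).1
        simp [letLoopJ, List.erase_cons_head]
      · have hr : s ∈ rest := by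
          rcases List.mem_cons.mp h with h' | h'
          · exact absurd h' hj
          · exact h'
        have := ih (List.nodup_cons.mp hnd).2 hr
        simp [letLoopJ, hj, this, List.erase_cons_tail, Ne.symm hj]

-- A's fold, with candidates = the vowels not yet in the accumulator, is the canonical fold
theorem letInvariant (cs : List Char) (acc : List String) :
    (cs.foldl letStepA ((["a","e","i","o","u"] : List String).filter
        (fun v => !decide (v ∈ acc)), acc)).2
      = cs.foldl canonStep acc := by
  induction cs generalizing acc with
  | nil => rfl
  | cons c rest ih =>
      simp only [List.foldl_cons]
      set s := String.ofList [c] with hs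
      by_cases hv : s ∈ (["a","e","i","o","u"] : List String)
      · by_cases hseen : s ∈ acc
        · have hnot : s ∉ (["a","e","i","o","u"] : List String).filter
              (fun v => !decide (v ∈ acc)) := by
            intro hmem
            have := (List.mem_filter.mp hmem).2
            simp [hseen] at this
          have hA : letStepA ((["a","e","i","o","u"] : List String).filter
              (fun v => !decide (v ∈ acc)), acc) c
              = ((["a","e","i","o","u"] : List String).filter
                  (fun v => !decide (v ∈ acc)), acc) := by
            simp only [letStepA, ← hs, letLoopJ_not_mem s _ hnot]
            rfl
          have hB : canonStep acc c = acc := by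
            simp [canonStep, ← hs, hseen]
          rw [hA, hB]
          exact ih acc
        · have hmem : s ∈ (["a","e","i","o","u"] : List String).filter
              (fun v => !decide (v ∈ acc)) := by
            refine List.mem_filter.mpr ⟨hv, ?_⟩
            simp [hseen]
          have hnd : ((["a","e","i","o","u"] : List String).filter
              (fun v => !decide (v ∈ acc))).Nodup :=
            List.Nodup.filter _ (by decide)
          have hA : letStepA ((["a","e","i","o","u"] : List String).filter
              (fun v => !decide (v ∈ acc)), acc) c
              = (((["a","e","i","o","u"] : List String).filter
                  (fun v => !decide (v ∈ acc))).erase s, acc ++ [s]) := by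
            simp only [letStepA, ← hs, letLoopJ_mem s _ hnd hmem]
            rfl
          have hB : canonStep acc c = acc ++ [s] := by
            simp [canonStep, ← hs, hv, hseen]
          have herase : ((["a","e","i","o","u"] : List String).filter
              (fun v => !decide (v ∈ acc))).erase s
              = (["a","e","i","o","u"] : List String).filter
                  (fun v => !decide (v ∈ acc ++ [s])) := by
            rw [List.Nodup.erase_eq_filter hnd, List.filter_filter]
            apply List.filter_congr
            intro v _
            by_cases hvs : v = s
            · subst hvs; simp
            · simp [hvs, List.mem_append]
          rw [hA, hB, herase]
          exact ih (acc ++ [s])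
      · have hnot : s ∉ (["a","e","i","o","u"] : List String).filter
            (fun v => !decide (v ∈ acc)) := fun hmem => hv (List.mem_filter.mp hmem).1
        have hA : letStepA ((["a","e","i","o","u"] : List String).filter
            (fun v => !decide (v ∈ acc)), acc) c
            = ((["a","e","i","o","u"] : List String).filter
                (fun v => !decide (v ∈ acc)), acc) := by
          simp only [letStepA, ← hs, letLoopJ_not_mem s _ hnot]
          rfl
        have hB : canonStep acc c = acc := by
          simp [canonStep, ← hs, hv]
        rw [hA, hB]
        exact ih acc

-- str.find for a single-character needle is idxOf
theorem find_singleton (c : Char) (cs : List Char) :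
    PySem.Chars.find cs [c] = if c ∈ cs then (cs.idxOf c : Int) else -1 := by
  have go : ∀ (l : List Char) (k : Nat),
      PySem.Chars.find.go [c] l k = if c ∈ l then ((k : Int) + l.idxOf c) else -1 := by
    intro l
    induction l with
    | nil => intro k; simp [PySem.Chars.find.go]
    | cons h t ih =>
        intro k
        by_cases hc : c = h
        · subst hc; simp [PySem.Chars.find.go, List.isPrefixOf]
        · simp [PySem.Chars.find.go, List.isPrefixOf, hc, ih, Ne.symm hc]
          split_ifs
          · ring
          · rfl
  simp [PySem.Chars.find, go]

theorem find_nonneg_single (c : Char) (cs : List Char) :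
    0 ≤ PySem.Chars.find cs [c] ↔ c ∈ cs := by
  rw [find_singleton]
  split_ifs with h <;> simp [h]

theorem find_append_single (c x : Char) (cs : List Char) (h : c ∈ cs) :
    PySem.Chars.find (cs ++ [x]) [c] = PySem.Chars.find cs [c] := by
  rw [find_singleton, find_singleton, List.idxOf_append]
  simp [h]

theorem canonStep_pos (st : List String) (c : Char)
    (h : String.ofList [c] ∈ (["a","e","i","o","u"] : List String) ∧ String.ofList [c] ∉ st) :
    canonStep st c = st ++ [String.ofList [c]] := by
  simp [canonStep, h.1, h.2]

theorem canonStep_neg (st : List String) (c : Char)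
    (h : ¬(String.ofList [c] ∈ (["a","e","i","o","u"] : List String) ∧ String.ofList [c] ∉ st)) :
    canonStep st c = st := by
  simp only [canonStep]
  rw [if_neg h]

theorem mem_foldl_canon (cs : List Char) (acc : List String) (v : String) :
    v ∈ cs.foldl canonStep acc
      ↔ v ∈ acc ∨ (v ∈ (["a","e","i","o","u"] : List String) ∧ ∃ c ∈ cs, v = String.ofList [c]) := by
  induction cs generalizing acc with
  | nil => simp
  | cons c rest ih =>
      rw [List.foldl_cons]
      by_cases hv : String.ofList [c] ∈ (["a","e","i","o","u"] : List String) ∧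
          String.ofList [c] ∉ acc
      · rw [canonStep_pos acc c hv, ih]
        constructor
        · rintro (hm | ⟨hV, d, hd, rfl⟩)
          · rcases List.mem_append.mp hm with h | h
            · exact Or.inl h
            · have hvc : v = String.ofList [c] := by simpa using h
              exact Or.inr ⟨hvc ▸ hv.1, c, List.mem_cons_self, hvc⟩
          · exact Or.inr ⟨hV, d, List.mem_cons_of_mem _ hd, rfl⟩
        · rintro (h | ⟨hV, d, hd, rfl⟩)
          · exact Or.inl (List.mem_append.mpr (Or.inl h))
          · rcases List.mem_cons.mp hd with rfl | hd'
            · exact Or.inl (List.mem_append.mpr (Or.inr (by simp)))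
            · exact Or.inr ⟨hV, d, hd', rfl⟩
      · rw [canonStep_neg acc c hv, ih]
        constructor
        · rintro (h | ⟨hV, d, hd, rfl⟩)
          · exact Or.inl h
          · exact Or.inr ⟨hV, d, List.mem_cons_of_mem _ hd, rfl⟩
        · rintro (h | ⟨hV, d, hd, rfl⟩)
          · exact Or.inl h
          · rcases List.mem_cons.mp hd with rfl | hd'
            · rcases not_and_or.mp hv with h' | h'
              · exact absurd hV h'
              · exact Or.inl (not_not.mp h')
            · exact Or.inr ⟨hV, d, hd', rfl⟩

theorem vow_single (v : String) (hv : v ∈ (["a","e","i","o","u"] : List String)) :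
    ∃ cv : Char, v = String.ofList [cv] := by
  fin_cases hv
  · exact ⟨'a', rfl⟩
  · exact ⟨'e', rfl⟩
  · exact ⟨'i', rfl⟩
  · exact ⟨'o', rfl⟩
  · exact ⟨'u', rfl⟩

theorem mem_canon (cs : List Char) (v : String) :
    v ∈ cs.foldl canonStep []
      ↔ v ∈ (["a","e","i","o","u"] : List String) ∧ 0 ≤ PySem.Chars.find cs v.toList := by
  rw [mem_foldl_canon]
  simp only [List.not_mem_nil, false_or]
  constructor
  · rintro ⟨hV, c, hc, rfl⟩
    refine ⟨hV, ?_⟩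
    rw [String.toList_ofList, find_nonneg_single]
    exact hc
  · rintro ⟨hV, hf⟩
    obtain ⟨cv, rfl⟩ := vow_single v hV
    rw [String.toList_ofList, find_nonneg_single] at hf
    exact ⟨hV, cv, hf, rfl⟩

theorem nodup_foldl_canon (cs : List Char) (acc : List String) (h : acc.Nodup) :
    (cs.foldl canonStep acc).Nodup := by
  induction cs generalizing acc with
  | nil => exact h
  | cons c rest ih =>
      simp only [List.foldl_cons, canonStep]
      split_ifs with hc
      · exact ih _ (by simp [List.Nodup.append h (List.nodup_singleton _), hc.2])
      · exact ih _ h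

theorem pairwise_canon (cs : List Char) :
    (cs.foldl canonStep []).Pairwise
      (fun a b => PySem.Chars.find cs a.toList < PySem.Chars.find cs b.toList) := by
  induction cs using List.reverseRecOn with
  | nil => simp
  | append_singleton cs c ih =>
      rw [List.foldl_append, List.foldl_cons, List.foldl_nil]
      have stab : ∀ v ∈ cs.foldl canonStep [],
          PySem.Chars.find (cs ++ [c]) v.toList = PySem.Chars.find cs v.toList := by
        intro v hv
        obtain ⟨hV, hf⟩ := (mem_canon cs v).mp hv
        obtain ⟨cv, rfl⟩ := vow_single v hV
        rw [String.toList_ofList] at hf ⊢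
        exact find_append_single cv c cs ((find_nonneg_single cv cs).mp hf)
      have trans : (cs.foldl canonStep []).Pairwise
          (fun a b => PySem.Chars.find (cs ++ [c]) a.toList
            < PySem.Chars.find (cs ++ [c]) b.toList) := by
        refine List.Pairwise.imp_of_mem ?_ ih
        intro a b ha hb hlt
        rw [stab a ha, stab b hb]
        exact hlt
      by_cases hc : String.ofList [c] ∈ (["a","e","i","o","u"] : List String) ∧
          String.ofList [c] ∉ cs.foldl canonStep []
      · rw [canonStep_pos _ c hc, List.pairwise_append]
        refine ⟨trans, List.pairwise_singleton _ _, ?_⟩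
        intro a ha s hs
        simp only [List.mem_singleton] at hs
        subst hs
        obtain ⟨hV, hf⟩ := (mem_canon cs a).mp ha
        obtain ⟨cv, rfl⟩ := vow_single a hV
        rw [stab _ ha, String.toList_ofList, String.toList_ofList]
        have hcv : cv ∈ cs := (find_nonneg_single cv cs).mp (by
          rw [String.toList_ofList] at hf; exact hf)
        have hcnot : c ∉ cs := by
          intro hmem
          exact hc.2 ((mem_canon cs _).mpr ⟨hc.1, by
            rw [String.toList_ofList, find_nonneg_single]; exact hmem⟩)
        rw [find_singleton, find_singleton]
        have h1 : cs.idxOf cv < cs.length := List.idxOf_lt_length_of_mem hcv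
        simp [List.idxOf_append, hcv, hcnot]
        omega
      · rw [canonStep_neg _ c hc]
        exact trans

-- B's staged computation names exactly the canonical order
theorem alt_eq_canon (a : String) : let_py_alt a = a.toList.foldl canonStep [] := by
  have key : PySem.List.sorted
      (((["a","e","i","o","u"] : List String).map
          (fun v => (PySem.Chars.find a.toList v.toList, v))).filter
        (fun h => decide (0 ≤ h.1)))
      (fun h => h.1) false
      = (a.toList.foldl canonStep []).map
          (fun v => (PySem.Chars.find a.toList v.toList, v)) := by
    apply PySem.List.sorted_eq_of_perm_of_pairwise_lt
    · rw [List.perm_ext_iff_of_nodup]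
      · intro x
        simp only [List.mem_map, List.mem_filter, decide_eq_true_eq]
        constructor
        · rintro ⟨v, hv, rfl⟩
          obtain ⟨hV, hf⟩ := (mem_canon a.toList v).mp hv
          exact ⟨⟨v, hV, rfl⟩, hf⟩
        · rintro ⟨⟨v, hV, rfl⟩, hf⟩
          exact ⟨v, (mem_canon a.toList v).mpr ⟨hV, hf⟩, rfl⟩
      · refine List.Nodup.map ?_ (nodup_foldl_canon _ _ List.nodup_nil)
        intro x y hxy
        simpa using congrArg Prod.snd hxy
      · refine List.Nodup.filter _ (List.Nodup.map ?_ (by decide))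
        intro x y hxy
        simpa using congrArg Prod.snd hxy
    · rw [List.pairwise_map]
      exact pairwise_canon a.toList
  simp only [let_py_alt, PySem.Str.find_eq]
  rw [key, List.map_map]
  simp [Function.comp_def]

-- ===== VERDICT (by name: the statement is the Claim_ definition above) =====
theorem let_py_spec : Claim_equal_let_py := by
  intro a _
  show let_py a = let_py_alt a
  rw [alt_eq_canon]
  have := letInvariant a.toList []
  simpa [let_py] using this
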